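-- pv_equiv track=rewrite | github.com/HaolinCMU/Soft_tissue_tracking | nonlinear/kidney/nonlinearCasesCreation_kidney.py | generateElset
-- ===== SOURCE A (Python) =====
-- import copy
--
-- def generateElset(elem_list, elset_name, instance_name=None):
--     """
--     Generate element set information.
--
--     Parameters:
--     ----------
--     elem_list: List of ints.
--         The list of elements to be contained in the element list.
--     elset_name: String.
--         The name of the to-be-defined element list.
--     instance_name (optional): String.
--         The name of specified instance.
--         Only use in assembly definition.
--         Default: None. (Part cases)
--
--     Returns:
--     ----------
--     elset: List of strings.
--         The definition of a specific elset.
--     """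
--
--     if instance_name == None: elset = ["*Elset, elset={}".format(elset_name)]
--     else: elset = ["*Elset, elset={}, instance={}".format(elset_name, instance_name)]
--
--     elset_line_temp, elset_string_temp = [], None
--
--     for i, ind in enumerate(elem_list):
--         elset_line_temp.append(str(ind))
--
--         if (i+1) % 10 == 0:
--             elset_string_temp = ', '.join(elset_line_temp)
--             elset.append(copy.deepcopy(elset_string_temp))
--             elset_line_temp, elset_string_temp = [], None
--
--     elset_string_temp = ', '.join(elset_line_temp)
--     elset.append(copy.deepcopy(elset_string_temp))
--
--     return elset
-- ===== SOURCE B (Python) =====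
-- def generateElset(elem_list, elset_name, instance_name=None):
--     if instance_name is None:
--         header = ["*Elset, elset={}".format(elset_name)]
--     else:
--         header = ["*Elset, elset={}, instance={}".format(elset_name, instance_name)]
--     full = (len(elem_list) // 10) * 10
--     lines = [', '.join(str(x) for x in elem_list[i:i + 10])
--              for i in range(0, full, 10)]
--     lines.append(', '.join(str(x) for x in elem_list[full:]))
--     return header + lines
-- ===== Notes on version B (the rewrite author's own statement) =====
-- stated objective: simpler
-- what changed: B replaces A's stateful accumulate-and-flush loop (line buffer, modulo counter, deepcopy) with direct arithmetic chunking: it computes full = (n//10)*10, builds each full line from the slice elem_list[i:i+10], and appends the join of the tail slice unconditionally.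
import Mathlib
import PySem

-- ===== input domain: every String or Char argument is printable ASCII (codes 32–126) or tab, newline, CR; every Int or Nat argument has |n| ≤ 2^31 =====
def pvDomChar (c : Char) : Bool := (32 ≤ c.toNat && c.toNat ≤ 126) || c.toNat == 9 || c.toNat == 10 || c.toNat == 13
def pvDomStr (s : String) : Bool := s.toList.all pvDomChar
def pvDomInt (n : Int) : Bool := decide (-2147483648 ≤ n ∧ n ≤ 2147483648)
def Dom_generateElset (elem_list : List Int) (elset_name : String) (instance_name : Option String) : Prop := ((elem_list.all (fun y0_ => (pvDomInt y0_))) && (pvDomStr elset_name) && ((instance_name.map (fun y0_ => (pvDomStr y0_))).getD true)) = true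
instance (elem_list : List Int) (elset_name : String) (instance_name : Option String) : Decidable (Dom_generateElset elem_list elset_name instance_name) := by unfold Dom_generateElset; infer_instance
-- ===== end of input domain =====

-- B replaces A's stateful accumulate-and-flush loop with direct arithmetic chunking over slices (simpler decomposition, same O(n) cost).


-- ===== PORT A =====
-- A's for-loop over enumerate(elem_list): state (elset, elset_line_temp); flush when (i+1) % 10 == 0.
def generateElsetLoop (xs : List (Int × Int)) (elset : List String) (line : List String) : List String × List String :=
  match xs with
  | [] => (elset, line)
  | (i, x) :: rest =>
    let line' := line ++ [PySem.Int.toStr x]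
    if PySem.Int.mod (i + 1) 10 == 0 then
      generateElsetLoop rest (elset ++ [PySem.Str.join ", " line']) []
    else
      generateElsetLoop rest elset line'

def generateElset (elem_list : List Int) (elset_name : String) (instance_name : Option String) : List String :=
  let elset : List String :=
    match instance_name with
    | none => ["*Elset, elset=" ++ elset_name]
    | some inst => ["*Elset, elset=" ++ elset_name ++ ", instance=" ++ inst]
  let p := generateElsetLoop (PySem.List.enumerate elem_list 0) elset []
  p.1 ++ [PySem.Str.join ", " p.2]

-- ===== PORT B =====
def generateElset_alt (elem_list : List Int) (elset_name : String) (instance_name : Option String) : List String :=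
  let header : List String :=
    match instance_name with
    | none => ["*Elset, elset=" ++ elset_name]
    | some inst => ["*Elset, elset=" ++ elset_name ++ ", instance=" ++ inst]
  let full : Int := PySem.Int.floordiv (elem_list.length : Int) 10 * 10
  let lines : List String :=
    (PySem.List.pyRange 0 full 10).map
      (fun i => PySem.Str.join ", " ((PySem.List.slice elem_list (some i) (some (i + 10))).map PySem.Int.toStr))
  header ++ (lines ++ [PySem.Str.join ", " ((PySem.List.slice elem_list (some full) none).map PySem.Int.toStr)])

-- ===== PRECONDITION & SPEC =====
def Spec_generateElset (elem_list : List Int) (elset_name : String) (instance_name : Option String) (out : List String) : Prop := out = generateElset_alt elem_list elset_name instance_name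
instance (elem_list : List Int) (elset_name : String) (instance_name : Option String) (out : List String) : Decidable (Spec_generateElset elem_list elset_name instance_name out) := by unfold Spec_generateElset; infer_instance

-- ===== CLAIM (what is proved, stated in full; the proofs are below) =====
def Claim_equal_generateElset : Prop := ∀ (elem_list : List Int) (elset_name : String) (instance_name : Option String), Dom_generateElset elem_list elset_name instance_name → Spec_generateElset elem_list elset_name instance_name (generateElset elem_list elset_name instance_name)

-- ===== LEMMAS AND PROOFS =====

-- join of the comma-separated string forms of a chunk
def pvJ (l : List Int) : String := PySem.Str.join ", " (l.map PySem.Int.toStr)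

-- the common shape both programs produce after the header: lines of 10, then the unconditional tail line
def chunkLines (l : List Int) : List String :=
  if _h : 10 ≤ l.length then
    pvJ (l.take 10) :: chunkLines (l.drop 10)
  else
    [pvJ l]
termination_by l.length
decreasing_by simp; omega

lemma loop_append (u v : List (Int × Int)) : ∀ (elset line : List String),
    generateElsetLoop (u ++ v) elset line
      = generateElsetLoop v (generateElsetLoop u elset line).1 (generateElsetLoop u elset line).2 := by
  induction u with
  | nil => intro elset line; simp [generateElsetLoop]
  | cons p rest ih =>
    intro elset line
    obtain ⟨i, x⟩ := p
    simp only [List.cons_append, generateElsetLoop]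
    split
    · exact ih _ _
    · exact ih _ _

lemma loop_no_flush (xs : List Int) : ∀ (s : Int) (elset line : List String),
    (∀ k : Nat, k < xs.length → PySem.Int.mod (s + k + 1) 10 ≠ 0) →
    generateElsetLoop (PySem.List.enumerate xs s) elset line = (elset, line ++ xs.map PySem.Int.toStr) := by
  induction xs with
  | nil => intro s elset line _; simp [PySem.List.enumerate_nil, generateElsetLoop]
  | cons x tl ih =>
    intro s elset line h
    rw [PySem.List.enumerate_cons]
    have h0 : PySem.Int.mod (s + 1) 10 ≠ 0 := by
      have := h 0 (by simp); simpa using this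
    simp only [generateElsetLoop, beq_iff_eq, if_neg h0]
    rw [ih (s + 1) elset (line ++ [PySem.Int.toStr x]) ?_]
    · simp
    · intro k hk
      have := h (k + 1) (by simpa using Nat.succ_lt_succ hk)
      have e : s + 1 + (k : Int) + 1 = s + ((k : Nat) + 1 : Nat) + 1 := by push_cast; ring
      rw [e]; exact this

lemma loop_flush (ys : List Int) : ∀ (s : Int) (elset line : List String),
    (∀ k : Nat, k < ys.length - 1 → PySem.Int.mod (s + k + 1) 10 ≠ 0) →
    PySem.Int.mod (s + ys.length) 10 = 0 →
    ys ≠ [] →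
    generateElsetLoop (PySem.List.enumerate ys s) elset line
      = (elset ++ [PySem.Str.join ", " (line ++ ys.map PySem.Int.toStr)], []) := by
  induction ys with
  | nil => intro _ _ _ _ _ hne; exact absurd rfl hne
  | cons x tl ih =>
    intro s elset line h hlast _
    rw [PySem.List.enumerate_cons]
    by_cases htl : tl = []
    · subst htl
      have hc : PySem.Int.mod (s + 1) 10 = 0 := by simpa using hlast
      have hd : (10 : Int) ∣ s + 1 := (PySem.Int.mod_eq_zero_iff_dvd _ _).mp hc
      simp [generateElsetLoop, hd]
    · have hlen : 1 ≤ tl.length := by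
        cases tl with | nil => exact absurd rfl htl | cons a b => simp
      have h0 : PySem.Int.mod (s + 1) 10 ≠ 0 := by
        have := h 0 (by simp; omega); simpa using this
      simp only [generateElsetLoop, beq_iff_eq, if_neg h0]
      rw [ih (s + 1) elset (line ++ [PySem.Int.toStr x]) ?_ ?_ htl]
      · simp
      · intro k hk
        have := h (k + 1) (by simp at hk ⊢; omega)
        have e : s + 1 + (k : Int) + 1 = s + ((k : Nat) + 1 : Nat) + 1 := by push_cast; ring
        rw [e]; exact this
      · have e : s + 1 + (tl.length : Int) = s + ((x :: tl).length : Nat) := by simp; ring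
        rw [e]; exact hlast

lemma mod_ten_emod (a : Int) : PySem.Int.mod a 10 = a % 10 :=
  PySem.Int.mod_eq_emod_of_pos (by norm_num)

lemma loopA_chunks : ∀ (n : Nat) (xs : List Int), xs.length ≤ n → ∀ (s : Int),
    s % 10 = 0 → ∀ (elset : List String),
    (generateElsetLoop (PySem.List.enumerate xs s) elset []).1
      ++ [PySem.Str.join ", " (generateElsetLoop (PySem.List.enumerate xs s) elset []).2]
    = elset ++ chunkLines xs := by
  intro n
  induction n with
  | zero =>
    intro xs hlen s hs elset
    have : xs = [] := List.length_eq_zero_iff.mp (Nat.le_zero.mp hlen)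
    subst this
    rw [chunkLines]
    simp [PySem.List.enumerate_nil, generateElsetLoop, pvJ]
  | succ m ih =>
    intro xs hlen s hs elset
    by_cases hshort : xs.length < 10
    · rw [loop_no_flush xs s elset [] ?_]
      · rw [chunkLines, dif_neg (by omega)]
        simp [pvJ]
      · intro k hk
        rw [mod_ten_emod]
        omega
    · have hsplit : xs = xs.take 10 ++ xs.drop 10 := (List.take_append_drop 10 xs).symm
      have hlen10 : (xs.take 10).length = 10 := by simp; omega
      conv_lhs => rw [hsplit]
      rw [PySem.List.enumerate_append, loop_append]
      rw [loop_flush (xs.take 10) s elset [] ?_ ?_ ?_]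
      · have hcast : ((List.take 10 xs).length : Int) = 10 := by rw [hlen10]; norm_num
        rw [hcast, chunkLines, dif_pos (by omega)]
        have hrec := ih (xs.drop 10) (by simp; omega) (s + 10) (by omega)
          (elset ++ [PySem.Str.join ", " (List.map PySem.Int.toStr (xs.take 10))])
        simpa [pvJ] using hrec
      · intro k hk
        rw [mod_ten_emod]
        rw [hlen10] at hk
        omega
      · rw [hlen10, mod_ten_emod]
        omega
      · intro hnil
        rw [hnil] at hlen10
        simp at hlen10

lemma A_eq_header_chunks (elem_list : List Int) (elset_name : String) (instance_name : Option String) :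
    generateElset elem_list elset_name instance_name
      = (match instance_name with
         | none => ["*Elset, elset=" ++ elset_name]
         | some inst => ["*Elset, elset=" ++ elset_name ++ ", instance=" ++ inst])
        ++ chunkLines elem_list := by
  unfold generateElset
  exact loopA_chunks elem_list.length elem_list le_rfl 0 (by decide) _

-- B side: normalize the pyRange/slice form to Nat chunk arithmetic, then induct.
lemma altNat_chunks : ∀ (n : Nat) (l : List Int), l.length ≤ n →
    (List.range (l.length / 10)).map (fun k => pvJ ((l.drop (10 * k)).take 10))
      ++ [pvJ (l.drop (l.length / 10 * 10))]
    = chunkLines l := by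
  intro n
  induction n with
  | zero =>
    intro l hlen
    have : l = [] := List.length_eq_zero_iff.mp (Nat.le_zero.mp hlen)
    subst this
    rw [chunkLines]
    simp
  | succ m ih =>
    intro l hlen
    by_cases hshort : l.length < 10
    · have hq : l.length / 10 = 0 := by omega
      rw [chunkLines, dif_neg (by omega)]
      simp [hq]
    · have hlen10 : 10 ≤ l.length := by omega
      have hq' : (List.drop 10 l).length = l.length - 10 := by simp
      have hq : l.length / 10 = (l.length - 10) / 10 + 1 := by omega
      rw [chunkLines, dif_pos hlen10, ← ih (l.drop 10) (by simp; omega)]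
      rw [hq, List.range_succ_eq_map]
      simp only [List.map_cons, List.map_map, List.cons_append, hq']
      congr 1
      all_goals simp
      exact ⟨fun a _ => by rw [show 10 * (a + 1) = 10 + 10 * a from by ring],
        by rw [show ((l.length - 10) / 10 + 1) * 10 = 10 + (l.length - 10) / 10 * 10 from by ring]⟩

lemma pyRange_ten (q : Nat) :
    PySem.List.pyRange 0 ((q * 10 : Nat) : Int) 10 = (List.range q).map (fun k => ((10 * k : Nat) : Int)) := by
  rw [PySem.List.pyRange_of_pos 0 _ (by norm_num)]
  rcases Nat.eq_zero_or_pos q with h | h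
  · subst h; simp
  · have hb : (0 : Int) < ((q * 10 : Nat) : Int) := by positivity
    rw [if_pos (by exact_mod_cast hb)]
    have he : ((((q * 10 : Nat) : Int) - 0 + 10 - 1) / 10).toNat = q := by
      push_cast
      omega
    rw [he]
    apply List.map_congr_left
    intro k _
    push_cast
    ring

lemma full_eq (l : List Int) :
    PySem.Int.floordiv (l.length : Int) 10 * 10 = ((l.length / 10 * 10 : Nat) : Int) := by
  rw [PySem.Int.floordiv_eq_ediv_of_pos (by norm_num)]
  push_cast [Int.natCast_div]
  ring

lemma B_eq_header_chunks (elem_list : List Int) (elset_name : String) (instance_name : Option String) :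
    generateElset_alt elem_list elset_name instance_name
      = (match instance_name with
         | none => ["*Elset, elset=" ++ elset_name]
         | some inst => ["*Elset, elset=" ++ elset_name ++ ", instance=" ++ inst])
        ++ chunkLines elem_list := by
  unfold generateElset_alt
  simp only [full_eq, pyRange_ten]
  congr 1
  rw [← altNat_chunks elem_list.length elem_list le_rfl]
  congr 1
  · rw [List.map_map]
    apply List.map_congr_left
    intro k _
    simp only [Function.comp]
    rw [show (((10 * k : Nat) : Int) + 10) = (((10 * k : Nat) : Int) + ((10 : Nat) : Int)) by norm_num]
    rw [PySem.List.slice_natCast_add]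
    rfl
  · rw [PySem.List.slice_from_natCast]
    rfl

-- ===== VERDICT (by name: the statement is the Claim_ definition above) =====
theorem generateElset_spec : Claim_equal_generateElset := by
  intro elem_list elset_name instance_name _
  unfold Spec_generateElset
  rw [A_eq_header_chunks, B_eq_header_chunks]
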